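-- pv_equiv track=rewrite | github.com/weekmo/master_python | probability.py | has_three
-- ===== SOURCE A (Python) =====
-- def has_three(l):
--     dic = {}
--     for i in l:
--         if i in dic:
--             dic[i] += 1
--         else:
--             dic[i] = 1
--     for j in dic.values():
--         if j > 2:
--             return True
--     return False
-- ===== SOURCE B (Python) =====
-- def has_three(l):
--     return any(l.count(x) > 2 for x in l)
-- ===== Notes on version B (the rewrite author's own statement) =====
-- stated objective: simpler
-- what changed: B drops the dictionary entirely: a single generator expression checks each element's count in the list directly, instead of A's build-a-count-dict pass followed by a scan over its values.
import Mathlib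
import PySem

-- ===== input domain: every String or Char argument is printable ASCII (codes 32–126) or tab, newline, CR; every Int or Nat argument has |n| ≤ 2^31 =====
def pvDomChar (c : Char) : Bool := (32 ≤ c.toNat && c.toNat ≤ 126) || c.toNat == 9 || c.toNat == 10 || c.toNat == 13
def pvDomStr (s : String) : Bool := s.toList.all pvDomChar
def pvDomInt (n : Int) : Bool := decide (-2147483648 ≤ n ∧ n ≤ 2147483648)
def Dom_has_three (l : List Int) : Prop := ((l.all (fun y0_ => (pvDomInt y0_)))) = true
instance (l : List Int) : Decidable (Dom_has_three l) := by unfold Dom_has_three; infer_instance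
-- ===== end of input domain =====

-- B replaces A's count-dict-then-scan-values with a direct per-element count check (simpler, no dict; quadratic instead of linear).


-- ===== PORT A =====
-- 'if i in dic: dic[i] += 1 else: dic[i] = 1' then scan dic.values() for one > 2
def has_three (l : List Int) : Bool :=
  (l.foldl
    (fun d i => if d.contains i then d.insert i (d.getD i 0 + 1) else d.insert i 1)
    (PySem.Dict.empty : PySem.Dict Int Int)).values.any (fun j => 2 < j)

-- ===== PORT B =====
-- any(l.count(x) > 2 for x in l)
def has_three_alt (l : List Int) : Bool :=
  l.any (fun x => 2 < PySem.List.count l x)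

-- ===== PRECONDITION & SPEC =====
def Spec_has_three (l : List Int) (out : Bool) : Prop := out = has_three_alt l
instance (l : List Int) (out : Bool) : Decidable (Spec_has_three l out) := by unfold Spec_has_three; infer_instance

-- ===== CLAIM (what is proved, stated in full; the proofs are below) =====
def Claim_equal_has_three : Prop := ∀ (l : List Int), Dom_has_three l → Spec_has_three l (has_three l)

-- ===== LEMMAS AND PROOFS =====

-- A's counting loop builds exactly Counter(l)
theorem has_three_fold_eq_counter (l : List Int) :
    l.foldl (fun d i => if d.contains i then d.insert i (d.getD i 0 + 1) else d.insert i 1)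
      PySem.Dict.empty = PySem.Dict.counter l := by
  rw [← PySem.Dict.foldl_insert_getD_add_one_eq_counter]
  congr 1
  funext d i
  by_cases h : d.contains i = true
  · simp [h]
  · rw [if_neg h, PySem.Dict.getD_of_not_contains (d := d) (k := i) (d0 := 0) (h := by simpa using h)]
    norm_num

-- ===== VERDICT (by name: the statement is the Claim_ definition above) =====
theorem has_three_spec : Claim_equal_has_three := by
  intro l _
  unfold Spec_has_three has_three has_three_alt
  rw [has_three_fold_eq_counter]
  simp only [PySem.Dict.values, PySem.Dict.items_counter, List.map_map, List.any_map,
    PySem.List.count_eq]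
  simp only [Function.comp_def]
  rw [Bool.eq_iff_iff]
  simp [List.any_eq_true, PySem.Set.mem_ofList]
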